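-- pv_equiv track=rewrite | github.com/kuznetsovvj/education | algorithms/codeforces/1646c.py | solution
-- ===== SOURCE A (Python) =====
-- import itertools
--
-- fac = [87178291200, 6227020800, 479001600, 39916800, 3628800, 362880, 40320, 5040, 720, 120, 24, 6]
--
-- def cnt(num):
--     return bin(num).count('1')
--
-- def solution(num):
--     pos = 0
--     res = cnt(num)
--     if res == 1:
--         return 1
--     while pos < 12 and num < fac[pos]:
--         pos += 1
--     if pos == 12:
--         return res
--     for comb in itertools.product((1, 0), repeat=12 - pos):
--         tmp = num
--         c = 0
--         for idx, item in enumerate(comb):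
--             if item:
--                 tmp -= fac[pos + idx]
--                 c += 1
--         if tmp < 0:
--             continue
--         res = min(res, cnt(tmp) + c)
--
--     return res
-- ===== SOURCE B (Python) =====
-- fac = [87178291200, 6227020800, 479001600, 39916800, 3628800, 362880, 40320, 5040, 720, 120, 24, 6]
--
-- def cnt(num):
--     return bin(num).count('1')
--
-- def _best(i, rem, c):
--     # min of cnt(remainder)+count over all subsets of fac[i:] whose sum <= rem
--     if i == 12:
--         return cnt(rem) + c
--     b = _best(i + 1, rem, c)
--     if rem >= fac[i]:
--         b = min(b, _best(i + 1, rem - fac[i], c + 1))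
--     return b
--
-- def solution(num):
--     res = cnt(num)
--     if res == 1:
--         return 1
--     pos = 0
--     while pos < 12 and num < fac[pos]:
--         pos += 1
--     if pos == 12:
--         return res
--     return _best(pos, num, 0)
-- ===== Notes on version B (the rewrite author's own statement) =====
-- stated objective: alternative
-- what changed: The flat itertools.product scan over all subset masks of the factorial tail (re-walking each tuple with an inner enumerate loop) is replaced by an include/exclude backtracking recursion over the remaining indices that prunes any branch whose remainder would go negative; the empty subset supplies the cnt(num) baseline.
import Mathlib
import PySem

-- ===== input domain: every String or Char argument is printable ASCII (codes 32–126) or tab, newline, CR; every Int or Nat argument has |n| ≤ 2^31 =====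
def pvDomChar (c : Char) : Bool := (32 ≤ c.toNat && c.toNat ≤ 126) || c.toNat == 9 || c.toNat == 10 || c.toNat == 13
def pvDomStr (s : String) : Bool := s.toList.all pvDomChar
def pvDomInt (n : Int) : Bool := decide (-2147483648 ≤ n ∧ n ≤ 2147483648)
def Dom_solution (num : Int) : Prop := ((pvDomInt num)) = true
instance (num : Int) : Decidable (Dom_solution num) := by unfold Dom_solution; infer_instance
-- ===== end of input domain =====

-- B replaces the flat scan over all 2^(12-pos) itertools.product combinations by an
-- include/exclude backtracking recursion that prunes branches whose remainder would go
-- negative (objective: alternative decomposition; the pruning also measured faster).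

-- the module-level constant `fac`
def facL : List Int :=
  [87178291200, 6227020800, 479001600, 39916800, 3628800, 362880, 40320, 5040, 720, 120, 24, 6]

-- `cnt(num) = bin(num).count('1')`: bin() renders |num| in binary (sign as a '-' prefix),
-- so this is exactly the bit count of |num|, i.e. PySem.Int.bitCount.
def cnt (num : Int) : Int := (PySem.Int.bitCount num : Int)

-- the preamble loop `while pos < 12 and num < fac[pos]: pos += 1`, textually identical in
-- A and B; fac[pos] is read with pos < 12, always in range, so getD's default is never used.
def posAdv (num : Int) (p : Nat) : Nat :=
  if h : p < 12 ∧ num < facL.getD p 0 then posAdv num (p + 1) else p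
termination_by 12 - p
decreasing_by omega

-- ===== PORT A =====

-- itertools.product((1, 0), repeat=n): leftmost position varies slowest
def prodList : Nat → List (List Int)
  | 0 => [[]]
  | n + 1 => ([1, 0] : List Int).flatMap (fun x => (prodList n).map (x :: ·))

-- the inner `for idx, item in enumerate(comb): if item: tmp -= fac[pos+idx]; c += 1`;
-- fac[pos+idx] is always in range (comb has length 12-pos), so pyGetD's default is unused.
def innerFold (pos : Nat) (num : Int) (comb : List Int) : Int × Int :=
  (PySem.List.enumerate comb 0).foldl
    (fun tc p => if p.2 ≠ 0 then (tc.1 - PySem.List.pyGetD facL ((pos : Int) + p.1) 0, tc.2 + 1) else tc)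
    (num, 0)

def solution (num : Int) : Int :=
  let res := cnt num
  if res = 1 then 1
  else
    let pos := posAdv num 0
    if pos = 12 then res
    else
      (prodList (12 - pos)).foldl
        (fun res comb =>
          let tc := innerFold pos num comb
          if tc.1 < 0 then res else min res (cnt tc.1 + tc.2))
        res

-- ===== PORT B =====

-- B's `_best(i, rem, c)`; fac[i] is read with i < 12, always in range
def bestIdx (i : Nat) (rem c : Int) : Int :=
  if h : i < 12 then
    let b := bestIdx (i + 1) rem c
    if facL.getD i 0 ≤ rem then min b (bestIdx (i + 1) (rem - facL.getD i 0) (c + 1)) else b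
  else cnt rem + c
termination_by 12 - i
decreasing_by all_goals omega

def solution_alt (num : Int) : Int :=
  let res := cnt num
  if res = 1 then 1
  else
    let pos := posAdv num 0
    if pos = 12 then res
    else bestIdx pos num 0

-- ===== PRECONDITION & SPEC =====
def Spec_solution (num : Int) (out : Int) : Prop := out = solution_alt num
instance (num : Int) (out : Int) : Decidable (Spec_solution num out) := by unfold Spec_solution; infer_instance

-- ===== CLAIM (what is proved, stated in full; the proofs are below) =====
def Claim_equal_solution : Prop := ∀ (num : Int), Dom_solution num → Spec_solution num (solution num)

-- ===== LEMMAS AND PROOFS =====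

-- sum of the fac entries selected by a 0/1 mask (0 past the end, like pyGetD's default)
def selSum : List Int → List Int → Int
  | [], _ => 0
  | x :: xs, L => (if x ≠ 0 then L.headD 0 else 0) + selSum xs L.tail

-- number of selected entries
def selCnt : List Int → Int
  | [] => 0
  | x :: xs => (if x ≠ 0 then 1 else 0) + selCnt xs

-- list-structured restatement of B's index recursion (bridged to bestIdx below)
def bestL : List Int → Int → Int → Int
  | [], rem, c => cnt rem + c
  | f :: fs, rem, c =>
    let b := bestL fs rem c
    if f ≤ rem then min b (bestL fs (rem - f) (c + 1)) else b

lemma pyGetD_headD_drop (m : Nat) :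
    PySem.List.pyGetD facL ((m : Int)) 0 = (facL.drop m).headD 0 := by
  rw [PySem.List.pyGetD_natCast]
  simp [List.getD_eq_getElem?_getD, List.head?_eq_getElem?, List.getElem?_drop]

lemma innerFold_go (comb : List Int) : ∀ (pos j : Nat) (t c : Int),
    (PySem.List.enumerate comb (j : Int)).foldl
      (fun tc p => if p.2 ≠ 0 then (tc.1 - PySem.List.pyGetD facL ((pos : Int) + p.1) 0, tc.2 + 1) else tc)
      (t, c)
    = (t - selSum comb (facL.drop (pos + j)), c + selCnt comb) := by
  induction comb with
  | nil => intro pos j t c; simp [PySem.List.enumerate_nil, selSum, selCnt]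
  | cons x xs ih =>
    intro pos j t c
    rw [PySem.List.enumerate_cons]
    simp only [List.foldl_cons]
    have hcast : ((j : Int) + 1) = ((j + 1 : Nat) : Int) := by push_cast; ring
    have hget : PySem.List.pyGetD facL ((pos : Int) + (j : Int)) 0 = (facL.drop (pos + j)).headD 0 := by
      rw [show ((pos : Int) + (j : Int)) = ((pos + j : Nat) : Int) by push_cast; ring]
      exact pyGetD_headD_drop (pos + j)
    have htail : (facL.drop (pos + j)).tail = facL.drop (pos + (j + 1)) := by
      rw [List.tail_drop, Nat.add_assoc]
    by_cases hx : x = 0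
    · simp only [hx, ne_eq, not_true_eq_false, if_false]
      rw [hcast, ih pos (j + 1)]
      simp [selSum, selCnt, htail]
    · simp only [ne_eq, hx, not_false_eq_true, if_true]
      rw [hcast, ih pos (j + 1)]
      simp only [selSum, selCnt, ne_eq, hx, not_false_eq_true, if_true, hget, htail]
      rw [Prod.mk.injEq]
      constructor <;> ring

lemma innerFold_eq (pos : Nat) (num : Int) (comb : List Int) :
    innerFold pos num comb = (num - selSum comb (facL.drop pos), selCnt comb) := by
  simpa [innerFold] using innerFold_go comb pos 0 num 0

lemma selSum_nonneg (comb L : List Int) (hL : ∀ y ∈ L, 0 ≤ y) : 0 ≤ selSum comb L := by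
  induction comb generalizing L with
  | nil => simp [selSum]
  | cons x xs ih =>
    have h1 : 0 ≤ L.headD 0 := by
      cases L with
      | nil => simp
      | cons a as => exact hL a (by simp)
    have h2 : 0 ≤ selSum xs L.tail := ih L.tail (fun y hy => hL y (List.mem_of_mem_tail hy))
    simp only [selSum]
    split <;> omega

lemma foldl_skip {α β : Type} (l : List β) (f : α → β → α) (h : ∀ a x, x ∈ l → f a x = a) :
    ∀ acc, l.foldl f acc = acc := by
  induction l with
  | nil => intro acc; rfl
  | cons x xs ih =>
    intro acc
    rw [List.foldl_cons, h acc x (by simp)]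
    exact ih (fun a y hy => h a y (by simp [hy])) acc

-- A's product fold over the masks of L equals min(acc, B-style recursion over L)
lemma fold_prod (L : List Int) (hL : ∀ y ∈ L, 0 ≤ y) :
    ∀ (rem c acc : Int), 0 ≤ rem →
      (prodList L.length).foldl
        (fun res comb =>
          if rem - selSum comb L < 0 then res else min res (cnt (rem - selSum comb L) + (c + selCnt comb)))
        acc
      = min acc (bestL L rem c) := by
  induction L with
  | nil =>
    intro rem c acc hrem
    simp only [List.length_nil, prodList, List.foldl_cons, List.foldl_nil, selSum, selCnt, bestL]
    have : ¬ rem - 0 < 0 := by omega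
    simp only [this, if_false]
    norm_num
  | cons f fs ih =>
    intro rem c acc hrem
    have hf : 0 ≤ f := hL f (by simp)
    have hfs : ∀ y ∈ fs, 0 ≤ y := fun y hy => hL y (by simp [hy])
    show (prodList (fs.length + 1)).foldl _ acc = _
    rw [show prodList (fs.length + 1)
        = (prodList fs.length).map ((1 : Int) :: ·) ++ (prodList fs.length).map ((0 : Int) :: ·) by
      simp [prodList, List.flatMap]]
    rw [List.foldl_append, List.foldl_map, List.foldl_map]
    have hsel1 : ∀ comb : List Int, selSum ((1:Int) :: comb) (f :: fs) = f + selSum comb fs := by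
      intro comb; simp [selSum]
    have hsel0 : ∀ comb : List Int, selSum ((0:Int) :: comb) (f :: fs) = selSum comb fs := by
      intro comb; simp [selSum]
    by_cases hle : f ≤ rem
    · have e1 : (prodList fs.length).foldl
          (fun res comb => if rem - selSum ((1:Int) :: comb) (f :: fs) < 0 then res
            else min res (cnt (rem - selSum ((1:Int) :: comb) (f :: fs)) + (c + selCnt ((1:Int) :: comb)))) acc
          = min acc (bestL fs (rem - f) (c + 1)) := by
        rw [PySem.List.foldl_congr_mem (g := fun res comb =>
          if (rem - f) - selSum comb fs < 0 then res
            else min res (cnt ((rem - f) - selSum comb fs) + ((c + 1) + selCnt comb)))]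
        · exact ih hfs (rem - f) (c + 1) acc (by omega)
        · intro a comb _
          rw [hsel1]
          have h1 : rem - (f + selSum comb fs) = (rem - f) - selSum comb fs := by ring
          have h2 : c + selCnt ((1:Int) :: comb) = (c + 1) + selCnt comb := by simp [selCnt]; ring
          rw [h1, h2]
      rw [e1]
      have e0 : (prodList fs.length).foldl
          (fun res comb => if rem - selSum ((0:Int) :: comb) (f :: fs) < 0 then res
            else min res (cnt (rem - selSum ((0:Int) :: comb) (f :: fs)) + (c + selCnt ((0:Int) :: comb)))) (min acc (bestL fs (rem - f) (c + 1)))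
          = min (min acc (bestL fs (rem - f) (c + 1))) (bestL fs rem c) := by
        rw [PySem.List.foldl_congr_mem (g := fun res comb =>
          if rem - selSum comb fs < 0 then res
            else min res (cnt (rem - selSum comb fs) + (c + selCnt comb)))]
        · exact ih hfs rem c _ hrem
        · intro a comb _
          rw [hsel0]
          have h2 : c + selCnt ((0:Int) :: comb) = c + selCnt comb := by simp [selCnt]
          rw [h2]
      rw [e0]
      simp only [bestL, hle, if_true]
      omega
    · have e1 : (prodList fs.length).foldl
          (fun res comb => if rem - selSum ((1:Int) :: comb) (f :: fs) < 0 then res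
            else min res (cnt (rem - selSum ((1:Int) :: comb) (f :: fs)) + (c + selCnt ((1:Int) :: comb)))) acc
          = acc := by
        apply foldl_skip
        intro a comb _
        have hs : 0 ≤ selSum comb fs := selSum_nonneg comb fs hfs
        rw [hsel1]
        have : rem - (f + selSum comb fs) < 0 := by omega
        simp [this]
      rw [e1]
      have e0 : (prodList fs.length).foldl
          (fun res comb => if rem - selSum ((0:Int) :: comb) (f :: fs) < 0 then res
            else min res (cnt (rem - selSum ((0:Int) :: comb) (f :: fs)) + (c + selCnt ((0:Int) :: comb)))) acc
          = min acc (bestL fs rem c) := by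
        rw [PySem.List.foldl_congr_mem (g := fun res comb =>
          if rem - selSum comb fs < 0 then res
            else min res (cnt (rem - selSum comb fs) + (c + selCnt comb)))]
        · exact ih hfs rem c _ hrem
        · intro a comb _
          rw [hsel0]
          have h2 : c + selCnt ((0:Int) :: comb) = c + selCnt comb := by simp [selCnt]
          rw [h2]
      rw [e0]
      simp only [bestL, hle, if_false]

lemma bestL_le (L : List Int) : ∀ rem c, bestL L rem c ≤ cnt rem + c := by
  induction L with
  | nil => intro rem c; simp [bestL]
  | cons f fs ih =>
    intro rem c
    have := ih rem c
    simp only [bestL]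
    split <;> omega

lemma facL_nonneg : ∀ y ∈ facL, 0 ≤ y := by decide

lemma facL_ge6 : ∀ p : Nat, p < 12 → 6 ≤ facL.getD p 0 := by decide

lemma best_bridge : ∀ (k i : Nat), 12 - i = k → ∀ rem c, bestIdx i rem c = bestL (facL.drop i) rem c := by
  intro k
  induction k with
  | zero =>
    intro i hi rem c
    have h12 : ¬ i < 12 := by omega
    rw [bestIdx, dif_neg h12, List.drop_eq_nil_of_le (by simp [facL]; omega)]
    rfl
  | succ m ih =>
    intro i hi rem c
    have h12 : i < 12 := by omega
    have hlen : i < facL.length := by simp [facL]; omega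
    rw [bestIdx, dif_pos h12, List.drop_eq_getElem_cons hlen]
    have hget : facL.getD i 0 = facL[i] := List.getD_eq_getElem facL 0 hlen
    rw [ih (i + 1) (by omega) rem c, ih (i + 1) (by omega) (rem - facL.getD i 0) (c + 1)]
    simp only [bestL, hget]

lemma posAdv_le : ∀ (k p : Nat) (num : Int), 12 - p = k → p ≤ 12 → posAdv num p ≤ 12 := by
  intro k
  induction k with
  | zero =>
    intro p num hk hp
    rw [posAdv, dif_neg (by omega : ¬ (p < 12 ∧ num < facL.getD p 0))]
    omega
  | succ m ih =>
    intro p num hk hp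
    rw [posAdv]
    split
    · exact ih (p + 1) num (by omega) (by omega)
    · omega

lemma posAdv_spec : ∀ (k p : Nat) (num : Int), 12 - p = k → p ≤ 12 →
    posAdv num p < 12 → facL.getD (posAdv num p) 0 ≤ num := by
  intro k
  induction k with
  | zero =>
    intro p num hk hp hlt
    rw [posAdv, dif_neg (by omega : ¬ (p < 12 ∧ num < facL.getD p 0))] at hlt
    omega
  | succ m ih =>
    intro p num hk hp hlt
    by_cases h : p < 12 ∧ num < facL.getD p 0
    · rw [posAdv, dif_pos h] at hlt ⊢
      exact ih (p + 1) num (by omega) (by omega) hlt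
    · rw [posAdv, dif_neg h] at hlt ⊢
      have h2 : ¬ num < facL.getD p 0 := fun hn => h ⟨hlt, hn⟩
      omega

lemma drop_length_facL (pos : Nat) : (facL.drop pos).length = 12 - pos := by
  simp [facL]

-- ===== VERDICT (by name: the statement is the Claim_ definition above) =====
theorem solution_spec : Claim_equal_solution := by
  intro num _
  show solution num = solution_alt num
  unfold solution solution_alt
  by_cases h1 : cnt num = 1
  · simp [h1]
  · simp only [h1, if_false]
    have hple : posAdv num 0 ≤ 12 := posAdv_le 12 0 num rfl (by omega)
    by_cases h2 : posAdv num 0 = 12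
    · simp [h2]
    · simp only [h2, if_false]
      set pos := posAdv num 0 with hposdef
      have hlt : pos < 12 := by omega
      have hge : facL.getD pos 0 ≤ num := posAdv_spec 12 0 num rfl (by omega) hlt
      have h6 : 6 ≤ facL.getD pos 0 := facL_ge6 pos hlt
      have hnum : 0 ≤ num := by omega
      have hL : ∀ y ∈ facL.drop pos, 0 ≤ y := fun y hy => facL_nonneg y (List.drop_subset _ _ hy)
      rw [show (12 - pos) = (facL.drop pos).length from (drop_length_facL pos).symm]
      rw [PySem.List.foldl_congr_mem (g := fun res comb =>
        if num - selSum comb (facL.drop pos) < 0 then res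
          else min res (cnt (num - selSum comb (facL.drop pos)) + ((0:Int) + selCnt comb)))]
      · rw [fold_prod (facL.drop pos) hL num 0 (cnt num) hnum]
        have hle := bestL_le (facL.drop pos) num 0
        rw [min_eq_right (by simpa using hle)]
        exact (best_bridge (12 - pos) pos rfl num 0).symm
      · intro a comb _
        rw [innerFold_eq]
        norm_num
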